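-- pv_equiv track=rewrite | github.com/SergeantPanda/Stream-Watchdog | Modules/AIPTV.py | find_next_stream_after_current
-- ===== SOURCE A (Python) =====
-- def find_next_stream_after_current(available_streams, current_stream_id, USERNAME = None, PASSWORD = None):
--     """Find the next available stream after the current one in the list."""
--     # Transform available streams to a list of dictionaries
--     available_streams_by_id = {stream["id"]: stream for stream in available_streams}
--     # Check if the current stream ID exists in the available streams
--     if current_stream_id in available_streams_by_id:
--         # Find the list of available stream IDs
--         available_stream_ids = list(available_streams_by_id.keys())
--
--         # Find the index of the current stream in the list of available stream IDs
--         current_index = available_stream_ids.index(current_stream_id)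
--         # If there's a next stream in the list, return it
--         if current_index + 1 < len(available_stream_ids):
--             next_stream_id = available_stream_ids[current_index + 1]
--             return next_stream_id  # Return the next stream dictionary
--         elif current_index +1 == len(available_stream_ids):
--             next_stream_id = available_stream_ids[0]
--             return next_stream_id # Return the first stream in the dictionary after reaching the end
--     return None  # Return None if no next stream is found
-- ===== SOURCE B (Python) =====
-- def find_next_stream_after_current(available_streams, current_stream_id, USERNAME=None, PASSWORD=None):
--     """Find the next available stream after the current one in the list."""
--     # Single pass with an accumulator: no id list, no index scan, no lookup table.
--     seen = set()          # ids already encountered (dedup by first occurrence)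
--     first = None          # first distinct id (wraparound target)
--     found = False         # has current_stream_id's first occurrence been passed?
--     nxt = None            # first new id after the current one
--     for stream in available_streams:
--         sid = stream["id"]
--         if sid in seen:
--             continue
--         seen.add(sid)
--         if first is None:
--             first = sid
--         if found and nxt is None:
--             nxt = sid
--         if sid == current_stream_id:
--             found = True
--     if not found:
--         return None
--     return nxt if nxt is not None else first
-- ===== Notes on version B (the rewrite author's own statement) =====
-- stated objective: alternative
-- what changed: A materialises a dict of streams keyed by id and then locates the current id with .index() plus explicit next/wraparound branching; B is a single forward pass with an accumulator (seen-set, first distinct id, found flag, next-new-id), building no id list and doing no index scan.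
import Mathlib
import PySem

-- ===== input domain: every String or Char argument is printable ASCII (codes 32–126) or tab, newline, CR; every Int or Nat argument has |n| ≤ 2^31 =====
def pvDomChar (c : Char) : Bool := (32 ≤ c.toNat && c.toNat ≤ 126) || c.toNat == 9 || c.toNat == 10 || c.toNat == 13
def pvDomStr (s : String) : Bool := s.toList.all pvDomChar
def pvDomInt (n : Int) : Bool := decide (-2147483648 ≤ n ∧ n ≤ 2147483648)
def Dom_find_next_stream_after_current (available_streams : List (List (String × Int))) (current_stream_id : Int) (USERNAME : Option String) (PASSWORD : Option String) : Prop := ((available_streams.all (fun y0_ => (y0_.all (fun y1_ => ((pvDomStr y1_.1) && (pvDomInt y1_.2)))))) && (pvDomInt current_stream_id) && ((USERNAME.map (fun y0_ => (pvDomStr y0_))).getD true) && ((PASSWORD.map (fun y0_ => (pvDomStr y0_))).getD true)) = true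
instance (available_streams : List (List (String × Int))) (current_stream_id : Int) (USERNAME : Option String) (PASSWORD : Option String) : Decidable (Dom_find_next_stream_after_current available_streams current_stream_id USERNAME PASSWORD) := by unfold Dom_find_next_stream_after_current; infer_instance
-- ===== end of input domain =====

-- B replaces A's dict-of-streams + .index() wraparound scan with ONE forward pass carrying an accumulator (seen-set, first id, found flag, next-new id); alternative decomposition, same cost class.

-- ===== PORT A =====
-- stream["id"]: Python raises KeyError when "id" is absent; Pre_ excludes those inputs, so getD 0 is exact under Pre_
def pvId (s : List (String × Int)) : Int := (PySem.Dict.mk s).getD "id" 0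

def find_next_stream_after_current (available_streams : List (List (String × Int))) (current_stream_id : Int) (USERNAME : Option String) (PASSWORD : Option String) : Option Int :=
  let by_id : PySem.Dict Int (List (String × Int)) :=
    available_streams.foldl (fun d s => d.insert (pvId s) s) PySem.Dict.empty
  if by_id.contains current_stream_id then
    let ids := by_id.keys
    match PySem.List.index? ids current_stream_id with
    | none => none   -- .index() would raise ValueError; unreachable behind the contains guard
    | some ci =>
      if (ci : Int) + 1 < (ids.length : Int) then some (PySem.List.pyGetD ids ((ci : Int) + 1) 0)
      else if (ci : Int) + 1 = (ids.length : Int) then some (PySem.List.pyGetD ids 0 0)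
      else none
  else none

-- ===== PORT B =====
-- the loop body of Source B as a named step function over the state (seen, first, found, nxt);
-- 'sid in seen' / 'seen.add(sid)' are PySem.Set.contains / PySem.Set.add (exact)
def pvStepB (cur : Int) (st : PySem.Set Int × Option Int × Bool × Option Int)
    (stream : List (String × Int)) : PySem.Set Int × Option Int × Bool × Option Int :=
  let sid := pvId stream
  if PySem.Set.contains st.1 sid then st
  else
    (PySem.Set.add st.1 sid,
     (if st.2.1 = none then some sid else st.2.1),
     st.2.2.1 || (sid == cur),
     (if st.2.2.1 && st.2.2.2 = none then some sid else st.2.2.2))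

def find_next_stream_after_current_alt (available_streams : List (List (String × Int))) (current_stream_id : Int) (USERNAME : Option String) (PASSWORD : Option String) : Option Int :=
  let r := available_streams.foldl (pvStepB current_stream_id)
             (PySem.Set.empty, none, false, none)
  if r.2.2.1 then
    match r.2.2.2 with
    | some v => some v
    | none => r.2.1
  else none

-- ===== PRECONDITION & SPEC =====
-- Pre_ excludes exactly the inputs where some stream lacks the key "id": there Python's stream["id"] raises KeyError (in A and in B alike)
def Pre_find_next_stream_after_current (available_streams : List (List (String × Int))) (current_stream_id : Int) (USERNAME : Option String) (PASSWORD : Option String) : Prop :=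
  ∀ s ∈ available_streams, (PySem.Dict.mk s).contains "id" = true
instance (available_streams : List (List (String × Int))) (current_stream_id : Int) (USERNAME : Option String) (PASSWORD : Option String) : Decidable (Pre_find_next_stream_after_current available_streams current_stream_id USERNAME PASSWORD) := by unfold Pre_find_next_stream_after_current; infer_instance

def pvWitness_find_next_stream_after_current : (List (List (String × Int))) × Int × Option String × Option String :=
  ([[("id", 1)], [("id", 2)]], 1, none, none)

def Spec_find_next_stream_after_current (available_streams : List (List (String × Int))) (current_stream_id : Int) (USERNAME : Option String) (PASSWORD : Option String) (out : Option Int) : Prop := out = find_next_stream_after_current_alt available_streams current_stream_id USERNAME PASSWORD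
instance (available_streams : List (List (String × Int))) (current_stream_id : Int) (USERNAME : Option String) (PASSWORD : Option String) (out : Option Int) : Decidable (Spec_find_next_stream_after_current available_streams current_stream_id USERNAME PASSWORD out) := by unfold Spec_find_next_stream_after_current; infer_instance

-- ===== CLAIM (what is proved, stated in full; the proofs are below) =====
def Claim_equal_find_next_stream_after_current : Prop := ∀ (available_streams : List (List (String × Int))) (current_stream_id : Int) (USERNAME : Option String) (PASSWORD : Option String), Dom_find_next_stream_after_current available_streams current_stream_id USERNAME PASSWORD → Pre_find_next_stream_after_current available_streams current_stream_id USERNAME PASSWORD → Spec_find_next_stream_after_current available_streams current_stream_id USERNAME PASSWORD (find_next_stream_after_current available_streams current_stream_id USERNAME PASSWORD)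

-- ===== LEMMAS AND PROOFS =====

-- the common reference value: cyclic successor of cur in the deduped id list
def pvSpecF (ids : List Int) (cur : Int) : Option Int :=
  match PySem.List.index? ids cur with
  | none => none
  | some ci => some (ids.getD ((ci + 1) % ids.length) 0)

-- the per-new-id part of B's loop state, and its read-out
def pvCore (cur : Int) (st : Option Int × Bool × Option Int) (sid : Int) : Option Int × Bool × Option Int :=
  ((if st.1 = none then some sid else st.1),
   st.2.1 || (sid == cur),
   (if st.2.1 && st.2.2 = none then some sid else st.2.2))

def pvFinal (st : Option Int × Bool × Option Int) : Option Int :=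
  if st.2.1 then (match st.2.2 with | some v => some v | none => st.1) else none

-- the subsequence of ids B's seen-set lets through
def pvNews (s : PySem.Set Int) : List Int → List Int
  | [] => []
  | x :: xs => if PySem.Set.contains s x then pvNews s xs else x :: pvNews (PySem.Set.add s x) xs

theorem pvFoldEq (cur : Int) (l : List (List (String × Int))) : ∀ (s : PySem.Set Int) (st : Option Int × Bool × Option Int),
    (l.foldl (pvStepB cur) (s, st)).2 = (pvNews s (l.map pvId)).foldl (pvCore cur) st := by
  induction l with
  | nil => intro s st; rfl
  | cons x xs ih =>
    intro s st
    simp only [List.foldl_cons, List.map_cons, pvNews, pvStepB]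
    by_cases h : PySem.Set.contains s (pvId x)
    · simp only [h, if_true]; exact ih s st
    · simp only [h]; exact ih _ _

theorem pvFoldlAdd (xs : List Int) : ∀ s : PySem.Set Int, xs.foldl PySem.Set.add s = s ++ pvNews s xs := by
  induction xs with
  | nil => intro s; simp [pvNews]
  | cons x t ih =>
    intro s
    simp only [List.foldl_cons, pvNews]
    by_cases h : PySem.Set.contains s x
    · rw [if_pos h]
      have hx : x ∈ s := by simpa [PySem.Set.contains] using h
      have hadd : PySem.Set.add s x = s := by simp [PySem.Set.add, hx]
      rw [hadd, ih]
    · rw [if_neg h]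
      have hx : x ∉ s := by simpa [PySem.Set.contains] using h
      have hadd : PySem.Set.add s x = s ++ [x] := by simp [PySem.Set.add, hx]
      rw [hadd, ih (s ++ [x])]
      simp

theorem pvNews_nil (xs : List Int) : pvNews PySem.Set.empty xs = PySem.List.dedup xs := by
  rw [PySem.List.dedup_eq_ofList, PySem.Set.ofList_eq_foldl, pvFoldlAdd xs]
  simp [PySem.Set.empty]

-- once found with a recorded successor, B's state is a fixed point
theorem pvCoreFix (cur a v : Int) (l : List Int) :
    l.foldl (pvCore cur) (some a, true, some v) = (some a, true, some v) := by
  induction l with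
  | nil => rfl
  | cons y t ih => simpa [pvCore] using ih

-- found, successor not yet recorded: the next element (if any) is the answer
theorem pvCoreFound (cur a : Int) (l : List Int) :
    pvFinal (l.foldl (pvCore cur) (some a, true, none)) =
      match l with | [] => some a | z :: _ => some z := by
  cases l with
  | nil => rfl
  | cons z t =>
    have h1 : pvCore cur (some a, true, none) z = (some a, true, some z) := by simp [pvCore]
    simp only [List.foldl_cons, h1, pvCoreFix]
    rfl

-- not yet found, first id already recorded as a
theorem pvCoreScan (cur : Int) (l : List Int) : ∀ a : Int,
    pvFinal (l.foldl (pvCore cur) (some a, false, none)) =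
      match PySem.List.index? l cur with
      | none => none
      | some ci => if ci + 1 < l.length then some (l.getD (ci + 1) 0) else some a := by
  induction l with
  | nil => intro a; rfl
  | cons y t ih =>
    intro a
    by_cases hy : y = cur
    · subst hy
      have h1 : pvCore y (some a, false, none) y = (some a, true, none) := by simp [pvCore]
      rw [List.foldl_cons, h1, pvCoreFound]
      rw [PySem.List.index?_cons_self]
      cases t with
      | nil => simp
      | cons z t' => simp
    · have h1 : pvCore cur (some a, false, none) y = (some a, false, none) := by
        simp [pvCore, hy]
      rw [List.foldl_cons, h1, ih a]
      rw [PySem.List.index?_cons_of_ne _ hy]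
      cases hidx : PySem.List.index? t cur with
      | none => rfl
      | some ci =>
        simp only [Option.map_some]
        have hiff : ci + 1 + 1 < t.length + 1 ↔ ci + 1 < t.length := by omega
        by_cases hlt : ci + 1 < t.length
        · rw [if_pos hlt, if_pos (by simpa [hiff] using hlt)]
          simp [List.getD]
        · rw [if_neg hlt, if_neg (by simpa [hiff] using hlt)]

-- B computes the cyclic successor in the deduped id list
theorem pvAltEq (avail : List (List (String × Int))) (cur : Int) (U P : Option String) :
    find_next_stream_after_current_alt avail cur U P = pvSpecF (PySem.List.dedup (avail.map pvId)) cur := by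
  unfold find_next_stream_after_current_alt
  have hfold := pvFoldEq cur avail PySem.Set.empty (none, false, none)
  have hfin : (if (avail.foldl (pvStepB cur) (PySem.Set.empty, none, false, none)).2.2.1 then
      (match (avail.foldl (pvStepB cur) (PySem.Set.empty, none, false, none)).2.2.2 with
        | some v => some v
        | none => (avail.foldl (pvStepB cur) (PySem.Set.empty, none, false, none)).2.1)
      else none) = pvFinal ((avail.foldl (pvStepB cur) (PySem.Set.empty, none, false, none)).2) := rfl
  rw [hfin, hfold, pvNews_nil]
  set ids := PySem.List.dedup (avail.map pvId) with hids
  clear_value ids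
  cases ids with
  | nil => rfl
  | cons x t =>
    simp only [List.foldl_cons]
    by_cases hx : x = cur
    · subst hx
      have h1 : pvCore x (none, false, none) x = (some x, true, none) := by simp [pvCore]
      rw [h1, pvCoreFound]
      unfold pvSpecF
      rw [PySem.List.index?_cons_self]
      cases t with
      | nil => simp
      | cons z t' => simp [Nat.mod_eq_of_lt, List.getD]
    · have h1 : pvCore cur (none, false, none) x = (some x, false, none) := by simp [pvCore, hx]
      rw [h1, pvCoreScan]
      unfold pvSpecF
      rw [PySem.List.index?_cons_of_ne _ hx]
      cases hidx : PySem.List.index? t cur with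
      | none => rfl
      | some ci =>
        simp only [Option.map_some]
        obtain ⟨hci, -, -⟩ := PySem.List.getElem_of_index?_eq_some hidx
        by_cases hlt : ci + 1 < t.length
        · rw [if_pos hlt]
          have hm : (ci + 1 + 1) % (x :: t).length = ci + 1 + 1 := by
            simp only [List.length_cons]; exact Nat.mod_eq_of_lt (by omega)
          rw [hm]
          simp [List.getD]
        · have heq : ci + 1 = t.length := by omega
          rw [if_neg hlt]
          have hm : (ci + 1 + 1) % (x :: t).length = 0 := by
            simp only [List.length_cons, heq]; exact Nat.mod_self _
          rw [hm]
          simp [List.getD]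

-- keys of A's by_id dict = the deduped id list
theorem pvKeysA (l : List (List (String × Int))) :
    (l.foldl (fun d s => d.insert (pvId s) s) (PySem.Dict.empty : PySem.Dict Int (List (String × Int)))).keys
      = PySem.List.dedup (l.map (fun s => pvId s)) := by
  rw [PySem.Dict.keys_foldl_insert_key]
  simp [PySem.List.dedup_eq_ofList, PySem.Set.ofList_eq_foldl, PySem.Set.update]

-- A computes the cyclic successor in the deduped id list
theorem pvAEq (avail : List (List (String × Int))) (cur : Int) (U P : Option String) :
    find_next_stream_after_current avail cur U P = pvSpecF (PySem.List.dedup (avail.map pvId)) cur := by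
  unfold find_next_stream_after_current
  simp only []
  set ids := PySem.List.dedup (avail.map (fun s => pvId s)) with hids
  by_cases hmem : cur ∈ ids
  · have hc : (avail.foldl (fun d s => d.insert (pvId s) s) (PySem.Dict.empty : PySem.Dict Int (List (String × Int)))).contains cur = true := by
      have := (PySem.Dict.contains_iff_mem_keys (avail.foldl (fun d s => d.insert (pvId s) s) (PySem.Dict.empty : PySem.Dict Int (List (String × Int)))) cur)
      rw [pvKeysA] at this
      exact this.2 hmem
    obtain ⟨ci, hci⟩ := Option.isSome_iff_exists.mp ((PySem.List.index?_isSome_iff ids cur).2 hmem)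
    obtain ⟨hlt, -, -⟩ := PySem.List.getElem_of_index?_eq_some hci
    rw [hc, if_pos rfl, pvKeysA, ← hids, hci]
    unfold pvSpecF
    rw [hci]
    dsimp only
    rcases Nat.lt_or_ge (ci + 1) ids.length with h1 | h2
    · rw [if_pos (by omega)]
      have hcast : ((ci : Int) + 1) = ((ci + 1 : Nat) : Int) := by push_cast; ring
      rw [hcast, PySem.List.pyGetD_natCast, Nat.mod_eq_of_lt h1]
    · have heq : ci + 1 = ids.length := by omega
      rw [if_neg (by omega), if_pos (by omega)]
      rw [PySem.List.pyGetD_zero, heq, Nat.mod_self]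
  · have hc : (avail.foldl (fun d s => d.insert (pvId s) s) (PySem.Dict.empty : PySem.Dict Int (List (String × Int)))).contains cur = false := by
      have := (PySem.Dict.contains_iff_mem_keys (avail.foldl (fun d s => d.insert (pvId s) s) (PySem.Dict.empty : PySem.Dict Int (List (String × Int)))) cur)
      rw [pvKeysA] at this
      simpa using fun hh => hmem (this.1 hh)
    rw [hc]
    unfold pvSpecF
    rw [(PySem.List.index?_eq_none_iff ids cur).2 hmem]
    simp

-- ===== VERDICT (by name: the statement is the Claim_ definition above) =====
theorem find_next_stream_after_current_spec : Claim_equal_find_next_stream_after_current := by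
  intro avail cur U P _ _
  unfold Spec_find_next_stream_after_current
  rw [pvAEq, pvAltEq]
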